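-- pv_equiv track=rewrite | github.com/trriplejay/CodeEval | primepal.py | lower_prime_pal
-- ===== SOURCE A (Python) =====
-- def lower_prime_pal(n):
--     """
--     Finds the highest prime pallindrome that is lower than the given input "n"
--     """
--
--     # if n is 3 or less, it's already the lowest prime it can be
--     if n <= 3:
--         return n
--     #change the value n to be the next lowest odd number from the given n
--     #this will subtract 1 if the number given was even, and 2 if it was odd
--     n -= 1 + n%2
--
--     while 1:
--         """
--         As a general rule, you can test for the primality of 'n' by
--         attempting to divide it by all odd numbers from 3 to the square
--         root of n.  This implementation uses python list comprehension to
--         create an array of true/false values, which then are logically OR'd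
--         together by the 'any' function.  If even one of the mod x operations
--         resulted in 0, the number is not prime.
--         """
--
--         # First test for pallindrome, since that's more time efficient
--         # than testing for primality.
--         # Here's a pythonic test for a pallindrome.
--         if str(n)==str(n)[::-1]:
--             #the number is a pallindrome, but is it prime?
--             if not any([n%x==0 for x in range(3,int(n**.5)+2)]):
--                 # success, return the number
--                 return n
--         # decrement our number, as we're counting down to find the
--         # next highest
--         n-=2
-- ===== SOURCE B (Python) =====
-- # B: instead of scanning every odd number below n and string-testing each for
-- # palindromicity, generate decimal palindromes directly (by digit-length, from a
-- # descending half-"root") and trial-divide only those candidates.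
--
-- def _rev(x):
--     y = 0
--     while x > 0:
--         y = y * 10 + x % 10
--         x //= 10
--     return y
--
--
-- def _is_prime(p):
--     if p % 2 == 0:
--         return p == 2
--     i = 3
--     while i * i <= p:
--         if p % i == 0:
--             return False
--         i += 2
--     return True
--
--
-- def lower_prime_pal(n):
--     if n <= 3:
--         return n
--     m = n - 1
--     # number of decimal digits of m
--     d, t = 1, m
--     while t >= 10:
--         t //= 10
--         d += 1
--     while d >= 1:
--         k = (d + 1) // 2          # length of the palindrome's leading half
--         r = 10 ** k - 1
--         while r >= 10 ** (k - 1):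
--             # palindrome of length d whose leading half is r
--             p = r * 10 ** (d - k) + _rev(r // 10 ** (2 * k - d))
--             if p <= m and _is_prime(p):
--                 return p
--             r -= 1
--         d -= 1
-- ===== Notes on version B (the rewrite author's own statement) =====
-- stated objective: faster
-- what changed: A counts down over every odd number below n, string-testing each for palindromicity and trial-dividing it; B generates the decimal palindromes themselves in descending order (by digit length, from a descending half-root) and trial-divides only those ~sqrt(n) candidates.
import Mathlib
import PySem

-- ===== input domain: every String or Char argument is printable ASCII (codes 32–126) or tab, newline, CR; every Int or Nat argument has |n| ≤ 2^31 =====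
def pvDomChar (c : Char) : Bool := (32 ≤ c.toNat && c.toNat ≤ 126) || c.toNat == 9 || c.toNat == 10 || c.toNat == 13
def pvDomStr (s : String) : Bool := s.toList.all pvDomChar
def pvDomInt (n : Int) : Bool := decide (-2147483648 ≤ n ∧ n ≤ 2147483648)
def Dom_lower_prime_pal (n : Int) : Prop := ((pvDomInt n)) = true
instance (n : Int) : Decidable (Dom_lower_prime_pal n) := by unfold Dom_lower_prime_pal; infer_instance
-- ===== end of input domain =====

-- B replaces A's scan over every odd number below n (string-palindrome test plus
-- trial division on each) by direct generation of decimal palindromes in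
-- descending order from a half-"root", trial-dividing only those candidates.

-- ===== PORT A =====

-- any([n%x==0 for x in range(3, int(n**.5)+2)]).
-- int(n**.5) is ported as Nat.sqrt: exact for 0 ≤ n ≤ 2^31 (CPython's pow on a
-- double is within 1/2 ulp, far below the distance from sqrt(n) to the nearest
-- integer except at perfect squares, where it is exact).
def aAnyDiv (n : Int) : Bool :=
  ((PySem.List.pyRange 3 ((Nat.sqrt n.toNat : Int) + 2) 1).map
    (fun x => decide (PySem.Int.mod n x = 0))).any (fun b => b)

-- the 'while 1' loop; fuel is a totality guard only (the loop always stops at 3)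
def aLoop : Nat → Int → Int
  | 0, m => m
  | fuel+1, m =>
      -- str(n) == str(n)[::-1], ported on the char-list side
      -- (PySem.Str.slice?_none_none_neg_one: s[::-1] is reverse; PySem.Int.toList_toStr)
      if PySem.Int.toChars m = (PySem.Int.toChars m).reverse then
        if !(aAnyDiv m) then m else aLoop fuel (m - 2)
      else aLoop fuel (m - 2)

def lower_prime_pal (n : Int) : Int :=
  if n ≤ 3 then n
  else aLoop n.toNat (n - (1 + PySem.Int.mod n 2))

-- ===== PORT B =====

-- _rev's while loop (x stays ≥ 0; exponents/indices in B are nonnegative along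
-- every execution, so Python's ** is ported as ^ on a .toNat exponent)
def bRevAux (x y : Int) : Int :=
  if h : 0 < x then bRevAux (PySem.Int.floordiv x 10) (y * 10 + PySem.Int.mod x 10) else y
termination_by x.toNat
decreasing_by
  have h10 : PySem.Int.floordiv x 10 = x / 10 := PySem.Int.floordiv_eq_ediv_of_pos (by omega)
  rw [h10]; omega

def bIsPrimeAux (p i : Int) : Bool :=
  if h : i * i ≤ p then
    (if PySem.Int.mod p i = 0 then false else bIsPrimeAux p (i + 2))
  else true
termination_by (p + 1 - i).toNat
decreasing_by
  have hip : i ≤ p := by nlinarith [sq_nonneg i, sq_nonneg (i - 1)]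
  omega

def bIsPrime (p : Int) : Bool :=
  if PySem.Int.mod p 2 = 0 then p == 2 else bIsPrimeAux p 3

-- the digit-counting loop
def bDigits (t d : Int) : Int :=
  if h : 10 ≤ t then bDigits (PySem.Int.floordiv t 10) (d + 1) else d
termination_by t.toNat
decreasing_by
  have h10 : PySem.Int.floordiv t 10 = t / 10 := PySem.Int.floordiv_eq_ediv_of_pos (by omega)
  rw [h10]; omega

-- the inner while loop over the root r
def bInner (m d k r : Int) : Option Int :=
  if h : (10:Int) ^ (k - 1).toNat ≤ r then
    let p := r * (10:Int) ^ (d - k).toNat +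
      bRevAux (PySem.Int.floordiv r ((10:Int) ^ (2 * k - d).toNat)) 0
    if p ≤ m ∧ bIsPrime p then some p else bInner m d k (r - 1)
  else none
termination_by r.toNat
decreasing_by
  have h1 : (1:Int) ≤ (10:Int) ^ (k - 1).toNat := one_le_pow₀ (by norm_num)
  omega

-- the outer while loop over the digit length d; the 0 in the d = 0 branch is
-- Python's falling off the loop, which never happens (the d = 1 pass returns 3)
def bOuter (m d : Int) : Int :=
  if h : 1 ≤ d then
    let k := PySem.Int.floordiv (d + 1) 2
    match bInner m d k ((10:Int) ^ k.toNat - 1) with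
    | some p => p
    | none => bOuter m (d - 1)
  else 0
termination_by d.toNat
decreasing_by omega

def lower_prime_pal_alt (n : Int) : Int :=
  if n ≤ 3 then n
  else bOuter (n - 1) (bDigits (n - 1) 1)

-- ===== PRECONDITION & SPEC =====
def Spec_lower_prime_pal (n : Int) (out : Int) : Prop := out = lower_prime_pal_alt n
instance (n : Int) (out : Int) : Decidable (Spec_lower_prime_pal n out) := by unfold Spec_lower_prime_pal; infer_instance

-- ===== CLAIM (what is proved, stated in full; the proofs are below) =====
def Claim_equal_lower_prime_pal : Prop := ∀ (n : Int), Dom_lower_prime_pal n → Spec_lower_prime_pal n (lower_prime_pal n)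

-- ===== LEMMAS AND PROOFS =====

-- `GoodN q` = q's decimal digits form a palindrome and q is prime
abbrev GoodN (q : Nat) : Prop := (Nat.digits 10 q).reverse = Nat.digits 10 q ∧ Nat.Prime q

-- the common reference value: the greatest good number ≤ m (0 if none)
def G (m : Nat) : Nat := Nat.findGreatest GoodN m

theorem good_three : GoodN 3 := by decide

-- `revN x` is the value of B's _rev loop: x's decimal digit string reversed
def revN (x : Nat) : Nat := Nat.ofDigits 10 ((Nat.digits 10 x).reverse)

-- `buildN d k r`: the length-d palindrome whose leading half (k digits) is r
def buildN (d k r : Nat) : Nat := r * 10 ^ (d - k) + revN (r / 10 ^ (2 * k - d))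

-- ---- decimal-digit facts ----

lemma digits_tail (n : Nat) : Nat.digits 10 (n / 10) = (Nat.digits 10 n).tail := by
  rcases Nat.eq_zero_or_pos n with h | h
  · subst h; simp
  · rw [Nat.digits_def' (by norm_num : (1:Nat) < 10) h]; rfl

lemma digits_div_pow (j n : Nat) : Nat.digits 10 (n / 10 ^ j) = (Nat.digits 10 n).drop j := by
  induction j generalizing n with
  | zero => simp
  | succ j ih =>
      have h1 : n / 10 ^ (j + 1) = (n / 10) / 10 ^ j := by
        rw [Nat.div_div_eq_div_mul, pow_succ, Nat.mul_comm]
      rw [h1, ih, digits_tail, List.drop_tail]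

lemma digitChar_inj_lt : ∀ (l1 l2 : List Nat), (∀ x ∈ l1, x < 10) → (∀ x ∈ l2, x < 10) →
    l1.map Nat.digitChar = l2.map Nat.digitChar → l1 = l2 := by
  have hinj : ∀ a, a < 10 → ∀ b, b < 10 → Nat.digitChar a = Nat.digitChar b → a = b := by decide
  intro l1
  induction l1 with
  | nil => intro l2 _ _ h; cases l2 <;> simp_all
  | cons a t ih =>
      intro l2 h1 h2 h
      cases l2 with
      | nil => simp at h
      | cons b t2 =>
          simp only [List.map_cons, List.cons.injEq] at h
          have ha := hinj a (h1 a (by simp)) b (h2 b (by simp)) h.1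
          subst ha
          have := ih t2 (fun x hx => h1 x (by simp [hx])) (fun x hx => h2 x (by simp [hx])) h.2
          simp [this]

lemma toDigitsCore_eq : ∀ (f n : Nat) (ds : List Char), 0 < n → n < f →
    Nat.toDigitsCore 10 f n ds = ((Nat.digits 10 n).map Nat.digitChar).reverse ++ ds := by
  intro f
  induction f with
  | zero => intro n ds h hf; omega
  | succ f ih =>
      intro n ds h hf
      rw [Nat.toDigitsCore]
      have hd := Nat.digits_def' (by norm_num : (1:Nat) < 10) h
      by_cases h10 : n / 10 = 0
      · have hn10 : n < 10 := by omega
        rw [if_pos h10, hd, h10]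
        simp [Nat.mod_eq_of_lt hn10]
      · have hpos : 0 < n / 10 := Nat.pos_of_ne_zero h10
        have hlt : n / 10 < f := by
          have := Nat.div_lt_self h (by norm_num : (1:Nat) < 10)
          omega
        simp only [if_neg h10]
        rw [ih (n / 10) _ hpos hlt, hd]
        simp

lemma toChars_natCast (q : Nat) (h : 0 < q) :
    PySem.Int.toChars (q : Int) = ((Nat.digits 10 q).map Nat.digitChar).reverse := by
  have hq : ¬ ((q : Int) < 0) := by omega
  simp only [PySem.Int.toChars, if_neg hq, Int.toNat_natCast, Nat.toDigits]
  rw [toDigitsCore_eq (q + 1) q [] h (by omega)]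
  simp

-- A's string test `str(n) == str(n)[::-1]` seen on the digit list
lemma pal_iff (q : Nat) (h : 0 < q) :
    (PySem.Int.toChars (q : Int) = (PySem.Int.toChars (q : Int)).reverse)
      ↔ (Nat.digits 10 q).reverse = Nat.digits 10 q := by
  rw [toChars_natCast q h, List.reverse_reverse]
  constructor
  · intro he
    exact digitChar_inj_lt _ _
      (fun x hx => Nat.digits_lt_base (by norm_num) (List.mem_reverse.mp hx))
      (fun x hx => Nat.digits_lt_base (by norm_num) hx)
      (by rw [List.map_reverse, he])
  · intro he
    rw [← List.map_reverse, he]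

-- ---- A's divisor scan is a primality test on odd q ≥ 3 ----

lemma aAnyDiv_iff (q : Nat) (h3 : 3 ≤ q) (hodd : q % 2 = 1) :
    (aAnyDiv (q : Int) = false) ↔ Nat.Prime q := by
  have hiff : (aAnyDiv (q : Int) = false) ↔
      ∀ x : Int, 3 ≤ x → x < (Nat.sqrt q : Int) + 2 → ¬ x ∣ (q : Int) := by
    unfold aAnyDiv
    rw [List.any_map, List.any_eq_false]
    constructor
    · intro h x hx1 hx2 hdvd
      have hmem : x ∈ PySem.List.pyRange 3 ((Nat.sqrt ((q : Int)).toNat : Int) + 2) 1 := by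
        rw [PySem.List.mem_pyRange_one]
        refine ⟨hx1, ?_⟩
        simpa using hx2
      have := h x hmem
      simp only [Function.comp, decide_eq_true_eq] at this
      exact this ((PySem.Int.mod_eq_zero_iff_dvd _ _).mpr hdvd)
    · intro h x hmem
      rw [PySem.List.mem_pyRange_one] at hmem
      simp only [Function.comp, decide_eq_true_eq]
      intro hmod
      refine h x hmem.1 ?_ ((PySem.Int.mod_eq_zero_iff_dvd _ _).mp hmod)
      have := hmem.2
      simpa using this
  rw [hiff]
  have hsq : Nat.sqrt q + 2 ≤ q := by
    rcases Nat.lt_or_ge q 4 with h4 | h4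
    · have hq3 : q = 3 := by omega
      subst hq3
      have : Nat.sqrt 3 < 2 := Nat.sqrt_lt.mpr (by norm_num)
      omega
    · by_contra hc
      have h1 : q - 1 ≤ Nat.sqrt q := by omega
      have h2 : (q - 1) * (q - 1) ≤ q := Nat.le_sqrt.mp h1
      have h6 : 3 * (q - 1) ≤ (q - 1) * (q - 1) := Nat.mul_le_mul_right _ (by omega)
      omega
  constructor
  · intro h
    rw [Nat.prime_def_le_sqrt]
    refine ⟨by omega, fun w hw2 hwsq hdvd => ?_⟩
    rcases Nat.eq_or_lt_of_le hw2 with hw | hw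
    · obtain ⟨c, rfl⟩ := (hw ▸ hdvd : 2 ∣ q)
      omega
    · exact h w (by omega) (by omega) (Int.natCast_dvd_natCast.mpr hdvd)
  · intro hp x hx1 hx2 hdvd
    set w := x.toNat with hw
    have hxw : x = (w : Int) := by omega
    have hwd : w ∣ q := Int.natCast_dvd_natCast.mp (by rw [← hxw]; exact hdvd)
    have hw3 : 3 ≤ w := by omega
    have hwlt : w < Nat.sqrt q + 2 := by omega
    rcases Nat.Prime.eq_one_or_self_of_dvd hp w hwd with h | h <;> omega

-- ---- B's trial division is a primality test ----

lemma bIsPrimeAux_eq (q : Nat) (hq : 3 ≤ q) (hodd : q % 2 = 1) :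
    ∀ (s i : Nat), s = q + 2 - i → 3 ≤ i → i % 2 = 1 →
    (∀ j, 3 ≤ j → j < i → j % 2 = 1 → ¬ j ∣ q) →
    ((bIsPrimeAux (q : Int) (i : Int)) = true ↔ Nat.Prime q) := by
  intro s
  induction s using Nat.strong_induction_on with
  | _ s ih =>
    intro i hs hi3 hiodd hnone
    rw [bIsPrimeAux]
    by_cases hle : (i : Int) * (i : Int) ≤ (q : Int)
    · have hleN : i * i ≤ q := by exact_mod_cast hle
      have hiq : i < q := by nlinarith
      rw [dif_pos hle]
      by_cases hdvd : PySem.Int.mod (q : Int) (i : Int) = 0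
      · rw [if_pos hdvd]
        simp only [Bool.false_eq_true, false_iff]
        intro hp
        have hidvd : i ∣ q := by
          have := (PySem.Int.mod_eq_zero_iff_dvd (q : Int) (i : Int)).mp hdvd
          exact_mod_cast this
        rcases Nat.Prime.eq_one_or_self_of_dvd hp i hidvd with h | h <;> omega
      · rw [if_neg hdvd]
        have hcast : (i : Int) + 2 = ((i + 2 : Nat) : Int) := by push_cast; ring
        rw [hcast]
        refine ih (q + 2 - (i + 2)) (by omega) (i + 2) rfl (by omega) (by omega) ?_
        intro j hj3 hji hjodd
        rcases Nat.lt_or_ge j i with hlt | hge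
        · exact hnone j hj3 hlt hjodd
        · have hj : j = i := by omega
          subst hj
          intro hdq
          exact hdvd ((PySem.Int.mod_eq_zero_iff_dvd _ _).mpr (by exact_mod_cast hdq))
    · have hgt : q < i * i := by
        have : ¬ (i * i ≤ q) := fun hc => hle (by exact_mod_cast hc)
        omega
      rw [dif_neg hle]
      simp only [true_iff]
      by_contra hnp
      have hq1 : q ≠ 1 := by omega
      have hpf : Nat.Prime q.minFac := Nat.minFac_prime hq1
      have hdvd : q.minFac ∣ q := Nat.minFac_dvd q
      have hsq : q.minFac ^ 2 ≤ q := Nat.minFac_sq_le_self (by omega) hnp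
      have hne2 : q.minFac ≠ 2 := by
        intro h2
        have : 2 ∣ q := h2 ▸ hdvd
        omega
      have hf3 : 3 ≤ q.minFac := by
        have := hpf.two_le
        omega
      have hfodd : q.minFac % 2 = 1 := by
        rcases Nat.even_or_odd q.minFac with he | ho
        · exact absurd ((Nat.Prime.even_iff hpf).mp he) hne2
        · exact Nat.odd_iff.mp ho
      have hflt : q.minFac < i := by nlinarith [hsq, hgt]
      exact hnone q.minFac hf3 hflt hfodd hdvd

lemma bIsPrime_iff (q : Nat) (h2 : 2 ≤ q) : (bIsPrime (q : Int) = true) ↔ Nat.Prime q := by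
  unfold bIsPrime
  by_cases he : PySem.Int.mod (q : Int) 2 = 0
  · rw [if_pos he]
    have h2d : 2 ∣ q := by
      have := (PySem.Int.mod_eq_zero_iff_dvd (q : Int) 2).mp he
      exact_mod_cast this
    constructor
    · intro h
      have : (q : Int) = 2 := by exact_mod_cast (beq_iff_eq.mp h)
      have : q = 2 := by exact_mod_cast this
      subst this; exact Nat.prime_two
    · intro hp
      have : q = 2 := ((Nat.Prime.even_iff hp).mp (even_iff_two_dvd.mpr h2d))
      subst this; rfl
  · rw [if_neg he]
    have hodd : q % 2 = 1 := by
      by_contra hc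
      have h0 : q % 2 = 0 := by omega
      apply he
      rw [(PySem.Int.mod_eq_zero_iff_dvd _ _)]
      exact_mod_cast Nat.dvd_of_mod_eq_zero h0
    have h3 : 3 ≤ q := by omega
    have : ((3 : Nat) : Int) = (3 : Int) := by norm_num
    rw [← this]
    exact bIsPrimeAux_eq q h3 hodd (q + 2 - 3) 3 rfl (by omega) (by omega) (by omega)

-- ---- B's digit counter ----

lemma bDigits_eq : ∀ (t : Nat), 0 < t → ∀ (dAcc : Int),
    bDigits (t : Int) dAcc = dAcc + ((Nat.digits 10 t).length - 1 : Nat) := by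
  intro t
  induction t using Nat.strong_induction_on with
  | _ t ih =>
    intro ht dAcc
    rw [bDigits]
    by_cases h10 : (10 : Int) ≤ (t : Int)
    · have h10N : 10 ≤ t := by exact_mod_cast h10
      rw [dif_pos h10]
      have hfd : PySem.Int.floordiv (t : Int) 10 = ((t / 10 : Nat) : Int) := by
        exact_mod_cast PySem.Int.floordiv_natCast t 10
      rw [hfd, ih (t / 10) (by omega) (by omega) (dAcc + 1)]
      have hlen : (Nat.digits 10 t).length = (Nat.digits 10 (t / 10)).length + 1 := by
        rw [Nat.digits_def' (by norm_num : (1:Nat) < 10) ht]; rfl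
      have hpos : 1 ≤ (Nat.digits 10 (t / 10)).length :=
        List.length_pos_iff.mpr (Nat.digits_ne_nil_iff_ne_zero.mpr (by omega))
      rw [hlen]
      have h1 : (Nat.digits 10 (t / 10)).length + 1 - 1 = (Nat.digits 10 (t / 10)).length := by
        omega
      rw [h1]
      omega
    · have h10N : t < 10 := by
        have : ¬ (10 ≤ t) := fun hc => h10 (by exact_mod_cast hc)
        omega
      rw [dif_neg h10]
      have : Nat.digits 10 t = [t] := by
        rw [Nat.digits_def' (by norm_num : (1:Nat) < 10) ht]
        rw [Nat.mod_eq_of_lt h10N, Nat.div_eq_of_lt h10N]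
        simp
      rw [this]
      simp

-- ---- B's reversal loop ----

lemma bRevAux_eq : ∀ (x : Nat) (y : Int),
    bRevAux (x : Int) y = y * 10 ^ (Nat.digits 10 x).length + (revN x : Int) := by
  intro x
  induction x using Nat.strong_induction_on with
  | _ x ih =>
    intro y
    rw [bRevAux]
    by_cases hx : (0 : Int) < (x : Int)
    · have hxN : 0 < x := by exact_mod_cast hx
      rw [dif_pos hx]
      have hfd : PySem.Int.floordiv (x : Int) 10 = ((x / 10 : Nat) : Int) := by
        exact_mod_cast PySem.Int.floordiv_natCast x 10
      have hmd : PySem.Int.mod (x : Int) 10 = ((x % 10 : Nat) : Int) := by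
        exact_mod_cast PySem.Int.mod_natCast x 10
      rw [hfd, hmd, ih (x / 10) (by omega) (y * 10 + ((x % 10 : Nat) : Int))]
      have hd := Nat.digits_def' (by norm_num : (1:Nat) < 10) hxN
      have hlen : (Nat.digits 10 x).length = (Nat.digits 10 (x / 10)).length + 1 := by
        rw [hd]; rfl
      have hrev : (revN x : Int) =
          (revN (x / 10) : Int) + 10 ^ (Nat.digits 10 (x / 10)).length * ((x % 10 : Nat) : Int) := by
        unfold revN
        rw [hd, List.reverse_cons, Nat.ofDigits_append]
        push_cast [Nat.ofDigits_singleton]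
        simp
      rw [hlen, hrev]
      ring
    · have hxN : x = 0 := by omega
      subst hxN
      rw [dif_neg hx]
      simp [revN]

-- ---- the generated candidate: digits, palindromicity, size, monotonicity ----

lemma buildN_digits (d k r : Nat) (hk : 1 ≤ k) (hkd : k ≤ d) (hdk : d ≤ 2 * k)
    (hlen : (Nat.digits 10 r).length = k) :
    Nat.digits 10 (buildN d k r) = (Nat.digits 10 r).reverse.take (d - k) ++ Nat.digits 10 r := by
  set R := Nat.digits 10 r with hR
  have hr0 : r ≠ 0 := by
    intro h
    rw [h] at hR
    simp [hR] at hlen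
    omega
  have hRne : R ≠ [] := by
    intro h
    rw [h] at hlen
    simp at hlen
    omega
  have hrev : revN (r / 10 ^ (2 * k - d)) = Nat.ofDigits 10 (R.reverse.take (d - k)) := by
    unfold revN
    rw [digits_div_pow, List.reverse_drop]
    congr 2
    rw [← hR, hlen]
    omega
  have hlen2 : (R.reverse.take (d - k)).length = d - k := by
    rw [List.length_take, List.length_reverse, hlen]
    omega
  have hval : buildN d k r = Nat.ofDigits 10 (R.reverse.take (d - k) ++ R) := by
    rw [Nat.ofDigits_append, hlen2]
    unfold buildN
    rw [hrev, hR, Nat.ofDigits_digits]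
    ring
  rw [hval]
  refine Nat.digits_ofDigits 10 (by norm_num) _ ?_ ?_
  · intro l hl
    rcases List.mem_append.mp hl with h | h
    · exact Nat.digits_lt_base (by norm_num) (List.mem_reverse.mp (List.mem_of_mem_take h))
    · exact Nat.digits_lt_base (by norm_num) h
  · intro hne
    rw [List.getLast_append_of_ne_nil hne hRne]
    exact Nat.getLast_digit_ne_zero 10 hr0

lemma buildN_pal (d k r : Nat) (hk : 1 ≤ k) (hkd : k ≤ d) (hdk : d ≤ 2 * k)
    (hdk1 : 2 * k ≤ d + 1) (hlen : (Nat.digits 10 r).length = k) :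
    (Nat.digits 10 (buildN d k r)).reverse = Nat.digits 10 (buildN d k r) := by
  rw [buildN_digits d k r hk hkd hdk hlen]
  set R := Nat.digits 10 r with hR
  rcases (by omega : d - k = k ∨ d - k = k - 1) with hc | hc
  · rw [hc]
    have ht : R.reverse.take k = R.reverse := List.take_of_length_le (by simp [hlen])
    rw [ht, List.reverse_append, List.reverse_reverse]
  · rw [hc]
    have hT : R.reverse.take (k - 1) = (R.drop 1).reverse := by
      rw [List.take_reverse]
      congr 2
      rw [hlen]
      omega
    have h1 : (R.take 1).reverse = R.take 1 := by
      cases R <;> simp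
    rw [List.reverse_append, hT, List.reverse_reverse]
    calc R.reverse ++ R.drop 1
        = ((R.take 1 ++ R.drop 1).reverse) ++ R.drop 1 := by rw [List.take_append_drop]
      _ = (R.drop 1).reverse ++ (R.take 1 ++ R.drop 1) := by
            rw [List.reverse_append, h1, List.append_assoc]
      _ = (R.drop 1).reverse ++ R := by rw [List.take_append_drop]

lemma buildN_len (d k r : Nat) (hk : 1 ≤ k) (hkd : k ≤ d) (hdk : d ≤ 2 * k)
    (hlen : (Nat.digits 10 r).length = k) :
    (Nat.digits 10 (buildN d k r)).length = d := by
  rw [buildN_digits d k r hk hkd hdk hlen]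
  rw [List.length_append, List.length_take, List.length_reverse, hlen]
  omega

lemma buildN_mono (d k r r' : Nat) (hk : 1 ≤ k) (hkd : k ≤ d) (hdk : d ≤ 2 * k)
    (hlen : (Nat.digits 10 r).length = k) (hlen' : (Nat.digits 10 r').length = k)
    (hrr : r < r') : buildN d k r < buildN d k r' := by
  have hlow : revN (r / 10 ^ (2 * k - d)) < 10 ^ (d - k) := by
    have h1 : revN (r / 10 ^ (2 * k - d)) <
        10 ^ ((Nat.digits 10 (r / 10 ^ (2 * k - d))).reverse).length :=
      Nat.ofDigits_lt_base_pow_length' (fun x hx =>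
        Nat.digits_lt_base (by norm_num) (List.mem_reverse.mp hx))
    have h2 : ((Nat.digits 10 (r / 10 ^ (2 * k - d))).reverse).length ≤ d - k := by
      rw [List.length_reverse, digits_div_pow, List.length_drop, hlen]
      omega
    calc revN (r / 10 ^ (2 * k - d)) < 10 ^ ((Nat.digits 10 (r / 10 ^ (2 * k - d))).reverse).length := h1
      _ ≤ 10 ^ (d - k) := Nat.pow_le_pow_right (by norm_num) h2
  unfold buildN
  have h3 : (r + 1) * 10 ^ (d - k) ≤ r' * 10 ^ (d - k) :=
    Nat.mul_le_mul_right _ (by omega)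
  have h4 : revN (r' / 10 ^ (2 * k - d)) ≥ 0 := Nat.zero_le _
  nlinarith [hlow, h3]

-- every length-d palindromic number is built from its leading half
lemma root_spec (q d k : Nat) (hq : 0 < q) (hk : 1 ≤ k) (hkd : k ≤ d) (hdk : d ≤ 2 * k)
    (hdk1 : 2 * k ≤ d + 1) (hlen : (Nat.digits 10 q).length = d)
    (hpal : (Nat.digits 10 q).reverse = Nat.digits 10 q) :
    (Nat.digits 10 (q / 10 ^ (d - k))).length = k ∧ buildN d k (q / 10 ^ (d - k)) = q := by
  set Q := Nat.digits 10 q with hQ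
  set r := q / 10 ^ (d - k) with hr
  have hdr : Nat.digits 10 r = Q.drop (d - k) := digits_div_pow (d - k) q
  have hlenr : (Nat.digits 10 r).length = k := by
    rw [hdr, List.length_drop, hlen]
    omega
  refine ⟨hlenr, ?_⟩
  have hbd := buildN_digits d k r hk hkd hdk hlenr
  have hRrev : (Nat.digits 10 r).reverse.take (d - k) = Q.take (d - k) := by
    rw [hdr, List.reverse_drop]
    have h1 : Q.length - (d - k) = k := by rw [hlen]; omega
    rw [h1, hpal]
    rw [List.take_take]
    congr 1
    omega
  have hdig : Nat.digits 10 (buildN d k r) = Q := by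
    rw [hbd, hRrev, hdr, List.take_append_drop]
  have := congrArg (Nat.ofDigits 10) hdig
  rwa [Nat.ofDigits_digits, hQ, Nat.ofDigits_digits] at this

-- ---- the two loops compute G ----

lemma digits_three : Nat.digits 10 3 = [3] := by
  rw [Nat.digits_def' (by norm_num : (1:Nat) < 10) (by norm_num)]
  norm_num

lemma G_step (m : Nat) (h : 2 < m) (hbad : ¬ GoodN m) : G m = G (m - 1) := by
  obtain ⟨m', rfl⟩ : ∃ m', m = m' + 1 := ⟨m - 1, by omega⟩
  unfold G
  rw [Nat.findGreatest_succ, if_neg hbad]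
  simp

lemma not_good_even (w : Nat) (h2 : 2 < w) (he : w % 2 = 0) : ¬ GoodN w := by
  rintro ⟨-, hp⟩
  have := (Nat.Prime.even_iff hp).mp (Nat.even_iff.mpr he)
  omega

lemma aLoop_eq : ∀ (fuel m : Nat), 3 ≤ m → m % 2 = 1 → m < fuel →
    aLoop fuel (m : Int) = (G m : Int) := by
  intro fuel
  induction fuel with
  | zero => intro m h3 hodd hlt; omega
  | succ f ih =>
    intro m h3 hodd hlt
    have hrec : ¬ GoodN m → aLoop f ((m : Int) - 2) = (G m : Int) := by
      intro hbad
      have hm3 : m ≠ 3 := fun h => hbad (h ▸ good_three)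
      have h5 : 5 ≤ m := by omega
      have hcast : ((m : Int) - 2) = ((m - 2 : Nat) : Int) := by omega
      rw [hcast, ih (m - 2) (by omega) (by omega) (by omega)]
      have h1 : G m = G (m - 1) := G_step m (by omega) hbad
      have h2 : G (m - 1) = G (m - 1 - 1) :=
        G_step (m - 1) (by omega) (not_good_even (m - 1) (by omega) (by omega))
      have h3' : m - 1 - 1 = m - 2 := by omega
      rw [h1, h2, h3']
    rw [aLoop]
    by_cases hpal : PySem.Int.toChars ((m : Nat) : Int) =
        (PySem.Int.toChars ((m : Nat) : Int)).reverse
    · rw [if_pos hpal]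
      by_cases hpr : aAnyDiv ((m : Nat) : Int) = false
      · rw [hpr]
        have hgood : GoodN m :=
          ⟨(pal_iff m (by omega)).mp hpal, (aAnyDiv_iff m h3 hodd).mp hpr⟩
        have hge : m ≤ G m := Nat.le_findGreatest (le_refl m) hgood
        have hle : G m ≤ m := Nat.findGreatest_le m
        simp only [Bool.not_false, if_pos]
        omega
      · have hpr' : aAnyDiv ((m : Nat) : Int) = true := by
          cases h : aAnyDiv ((m : Nat) : Int)
          · exact absurd h hpr
          · rfl
        rw [hpr']
        simp only [Bool.not_true, Bool.false_eq_true, if_false]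
        refine hrec ?_
        rintro ⟨-, hp⟩
        exact hpr ((aAnyDiv_iff m h3 hodd).mpr hp)
    · rw [if_neg hpal]
      refine hrec ?_
      rintro ⟨hpalN, -⟩
      exact hpal ((pal_iff m (by omega)).mpr hpalN)

lemma bInner_eq (m d k : Nat) (hm : 3 ≤ m) (hk : 1 ≤ k) (hkd : k ≤ d) (hdk : d ≤ 2 * k)
    (hdk1 : 2 * k ≤ d + 1) :
    ∀ (r : Nat), r < 10 ^ k →
    (∀ q, q ≤ m → GoodN q → (Nat.digits 10 q).length < d ∨
        ((Nat.digits 10 q).length = d ∧ q / 10 ^ (d - k) ≤ r)) →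
    (bInner (m : Int) (d : Int) (k : Int) (r : Int) = some (G m : Int) ∧
        ∃ q, q ≤ m ∧ GoodN q ∧ (Nat.digits 10 q).length = d)
    ∨ (bInner (m : Int) (d : Int) (k : Int) (r : Int) = none ∧
        ∀ q, q ≤ m → GoodN q → (Nat.digits 10 q).length ≠ d) := by
  intro r
  induction r using Nat.strong_induction_on with
  | _ r ih =>
    intro hrlt hinv
    have hexp : (((k : Int)) - 1).toNat = k - 1 := by omega
    rw [bInner]
    by_cases hge : 10 ^ (k - 1) ≤ r
    · have hgeI : (10 : Int) ^ (((k : Int)) - 1).toNat ≤ (r : Int) := by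
        rw [hexp]
        exact_mod_cast hge
      rw [dif_pos hgeI]
      have hr1 : 1 ≤ r := le_trans (Nat.one_le_pow _ _ (by norm_num)) hge
      have hlenr : (Nat.digits 10 r).length = k := by
        have h1 : (Nat.digits 10 r).length ≤ k :=
          (Nat.digits_length_le_iff (by norm_num) r).mpr hrlt
        have h2 : k - 1 < (Nat.digits 10 r).length :=
          (Nat.lt_digits_length_iff (by norm_num) r).mpr hge
        omega
      -- the computed candidate is buildN d k r
      have hpcast : (r : Int) * (10 : Int) ^ (((d : Int)) - ((k : Int))).toNat +
          bRevAux (PySem.Int.floordiv (r : Int) ((10 : Int) ^ ((2 * ((k : Int)) - ((d : Int)))).toNat)) 0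
          = ((buildN d k r : Nat) : Int) := by
        have he1 : (((d : Int)) - ((k : Int))).toNat = d - k := by omega
        have he2 : ((2 * ((k : Int)) - ((d : Int)))).toNat = 2 * k - d := by omega
        have he3 : ((10 : Int) ^ (2 * k - d)) = (((10 ^ (2 * k - d) : Nat)) : Int) := by
          push_cast; ring
        have he4 : PySem.Int.floordiv (r : Int) (((10 ^ (2 * k - d) : Nat)) : Int)
            = ((r / 10 ^ (2 * k - d) : Nat) : Int) := by
          exact_mod_cast PySem.Int.floordiv_natCast r (10 ^ (2 * k - d))
        rw [he1, he2, he3, he4, bRevAux_eq]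
        unfold buildN
        push_cast
        ring
      simp only [hpcast]
      have hbl := buildN_len d k r hk hkd hdk hlenr
      have hbp := buildN_pal d k r hk hkd hdk hdk1 hlenr
      have hplow : 10 ^ (d - 1) ≤ buildN d k r := by
        have h : d - 1 < (Nat.digits 10 (buildN d k r)).length := by rw [hbl]; omega
        exact (Nat.lt_digits_length_iff (by norm_num : (1:Nat) < 10) (buildN d k r)).mp h
      have hp2 : 2 ≤ buildN d k r := by
        rcases Nat.lt_or_ge d 2 with hd1 | hd2
        · -- d = 1, k = 1: the candidate is r itself, and INV at q = 3 forces 3 ≤ r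
          have hd : d = 1 := by omega
          have hk1 : k = 1 := by omega
          have hr3 : 3 ≤ r := by
            have h3 := hinv 3 hm good_three
            rw [digits_three] at h3
            rcases h3 with h | h
            · simp at h; omega
            · have : 3 / 10 ^ (d - k) ≤ r := h.2
              rw [hd, hk1] at this
              simpa using this
          have hpr : buildN d k r = r := by
            subst hd; subst hk1
            unfold buildN revN
            have h0 : r / 10 = 0 := Nat.div_eq_of_lt (by simpa using hrlt)
            simp [h0]
          omega
        · have : 10 ≤ 10 ^ (d - 1) := by
            calc (10 : Nat) = 10 ^ 1 := by norm_num
              _ ≤ 10 ^ (d - 1) := Nat.pow_le_pow_right (by norm_num) (by omega)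
          omega
      by_cases htest : ((buildN d k r : Nat) : Int) ≤ (m : Int) ∧ bIsPrime ((buildN d k r : Nat) : Int) = true
      · rw [if_pos htest]
        have hleq : buildN d k r ≤ m := by exact_mod_cast htest.1
        have hprime : Nat.Prime (buildN d k r) := (bIsPrime_iff _ hp2).mp htest.2
        have hgood : GoodN (buildN d k r) := ⟨hbp, hprime⟩
        left
        constructor
        · congr 1
          have hge' : buildN d k r ≤ G m := Nat.le_findGreatest hleq hgood
          have hle' : G m ≤ buildN d k r := by
            have hGgood : GoodN (G m) := Nat.findGreatest_spec hleq hgood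
            have hGle : G m ≤ m := Nat.findGreatest_le m
            rcases hinv (G m) hGle hGgood with hlt | ⟨hlend, hroot⟩
            · have : G m < 10 ^ (d - 1) :=
                (Nat.digits_length_le_iff (by norm_num) (G m)).mp (by omega)
              omega
            · have hGpos : 0 < G m := by omega
              obtain ⟨hlenroot, hbuild⟩ := root_spec (G m) d k hGpos hk hkd hdk hdk1 hlend hGgood.1
              rcases Nat.eq_or_lt_of_le hroot with he | hlt
              · rw [← hbuild, he]
              · have := buildN_mono d k (G m / 10 ^ (d - k)) r hk hkd hdk hlenroot hlenr hlt
                omega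
          omega
        · exact ⟨buildN d k r, hleq, hgood, hbl⟩
      · rw [if_neg htest]
        have hcast : ((r : Int)) - 1 = ((r - 1 : Nat) : Int) := by omega
        rw [hcast]
        refine ih (r - 1) (by omega) (by omega) ?_
        intro q hq hgq
        rcases hinv q hq hgq with h | ⟨hlend, hroot⟩
        · exact Or.inl h
        · refine Or.inr ⟨hlend, ?_⟩
          rcases Nat.eq_or_lt_of_le hroot with he | hlt
          · exfalso
            have hqpos : 0 < q := by
              have := hgq.2.two_le
              omega
            obtain ⟨hlenroot, hbuild⟩ := root_spec q d k hqpos hk hkd hdk hdk1 hlend hgq.1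
            rw [he] at hbuild
            apply htest
            rw [hbuild]
            exact ⟨by exact_mod_cast hq, (bIsPrime_iff q (hgq.2.two_le)).mpr hgq.2⟩
          · omega
    · have hgeI : ¬ ((10 : Int) ^ (((k : Int)) - 1).toNat ≤ (r : Int)) := by
        rw [hexp]
        intro hc
        exact hge (by exact_mod_cast hc)
      rw [dif_neg hgeI]
      right
      refine ⟨rfl, ?_⟩
      intro q hq hgq hlend
      have hqpos : 0 < q := by
        have := hgq.2.two_le
        omega
      obtain ⟨hlenroot, -⟩ := root_spec q d k hqpos hk hkd hdk hdk1 hlend hgq.1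
      have : 10 ^ (k - 1) ≤ q / 10 ^ (d - k) :=
        (Nat.lt_digits_length_iff (by norm_num) _).mp (by rw [hlenroot]; omega)
      have hrootle : q / 10 ^ (d - k) ≤ r := by
        rcases hinv q hq hgq with h | h
        · omega
        · exact h.2
      omega

lemma bOuter_eq (m : Nat) (hm : 3 ≤ m) : ∀ (d : Nat),
    (∀ q, q ≤ m → GoodN q → (Nat.digits 10 q).length ≤ d) →
    bOuter (m : Int) (d : Int) = (G m : Int) := by
  intro d
  induction d using Nat.strong_induction_on with
  | _ d ih =>
    intro hinv
    rcases Nat.eq_zero_or_pos d with hd0 | hdpos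
    · exfalso
      have h3 := hinv 3 hm good_three
      rw [digits_three, hd0] at h3
      simp at h3
    · rw [bOuter, dif_pos (by exact_mod_cast hdpos : (1 : Int) ≤ (d : Int))]
      set kN := (d + 1) / 2 with hkN
      have hk1 : 1 ≤ kN := by omega
      have hkd : kN ≤ d := by omega
      have hdk : d ≤ 2 * kN := by omega
      have hdk1 : 2 * kN ≤ d + 1 := by omega
      have hkcast : PySem.Int.floordiv ((d : Int) + 1) 2 = ((kN : Nat) : Int) := by
        have : ((d : Int) + 1) = ((d + 1 : Nat) : Int) := by push_cast; ring
        rw [this]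
        exact_mod_cast PySem.Int.floordiv_natCast (d + 1) 2
      have hr0cast : (10 : Int) ^ kN - 1 = ((10 ^ kN - 1 : Nat) : Int) := by
        have h1 : (1 : Nat) ≤ 10 ^ kN := Nat.one_le_iff_ne_zero.mpr (pow_ne_zero _ (by norm_num))
        push_cast [h1]
        ring
      have hinner := bInner_eq m d kN hm hk1 hkd hdk hdk1 (10 ^ kN - 1)
        (by have : 1 ≤ 10 ^ kN := Nat.one_le_iff_ne_zero.mpr (pow_ne_zero _ (by norm_num)); omega)
        ?_
      · rcases hinner with ⟨hsome, -⟩ | ⟨hnone, hnod⟩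
        · simp only [hkcast, Int.toNat_natCast, hr0cast, hsome]
        · simp only [hkcast, Int.toNat_natCast, hr0cast, hnone]
          have hcast : ((d : Int)) - 1 = ((d - 1 : Nat) : Int) := by omega
          rw [hcast]
          refine ih (d - 1) (by omega) ?_
          intro q hq hgq
          have h1 := hinv q hq hgq
          have h2 := hnod q hq hgq
          omega
      · intro q hq hgq
        rcases Nat.lt_or_ge (Nat.digits 10 q).length d with h | h
        · exact Or.inl h
        · have hle := hinv q hq hgq
          have hlend : (Nat.digits 10 q).length = d := by omega
          refine Or.inr ⟨hlend, ?_⟩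
          have hqlt : q < 10 ^ d := (Nat.digits_length_le_iff (by norm_num) q).mp (by omega)
          have : q / 10 ^ (d - kN) < 10 ^ kN := by
            rw [Nat.div_lt_iff_lt_mul (Nat.pow_pos (by norm_num))]
            calc q < 10 ^ d := hqlt
              _ = 10 ^ kN * 10 ^ (d - kN) := by rw [← pow_add]; congr 1; omega
          omega

-- ===== VERDICT (by name: the statement is the Claim_ definition above) =====
theorem lower_prime_pal_spec : Claim_equal_lower_prime_pal := by
  intro n _
  show lower_prime_pal n = lower_prime_pal_alt n
  unfold lower_prime_pal lower_prime_pal_alt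
  by_cases hn : n ≤ 3
  · rw [if_pos hn, if_pos hn]
  · rw [if_neg hn, if_neg hn]
    have hn4 : 4 ≤ n := by omega
    set N := n.toNat with hN
    have hnN : n = (N : Int) := by omega
    have hN4 : 4 ≤ N := by omega
    -- A's starting point: the largest odd number ≤ n - 1
    set M := N - 1 - N % 2 with hM
    have hmod : PySem.Int.mod n 2 = ((N % 2 : Nat) : Int) := by
      rw [hnN]
      exact_mod_cast PySem.Int.mod_natCast N 2
    have hstart : n - (1 + PySem.Int.mod n 2) = ((M : Nat) : Int) := by
      rw [hmod, hnN]
      omega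
    rw [hstart, hnN, aLoop_eq N M (by omega) (by omega) (by omega)]
    -- B's side
    have hsub : (N : Int) - 1 = ((N - 1 : Nat) : Int) := by omega
    rw [hsub, bDigits_eq (N - 1) (by omega) 1]
    have hlen1 : 1 ≤ (Nat.digits 10 (N - 1)).length :=
      List.length_pos_iff.mpr (Nat.digits_ne_nil_iff_ne_zero.mpr (by omega))
    have hdcast : (1 : Int) + (((Nat.digits 10 (N - 1)).length - 1 : Nat) : Int)
        = (((Nat.digits 10 (N - 1)).length : Nat) : Int) := by omega
    rw [hdcast, bOuter_eq (N - 1) (by omega) (Nat.digits 10 (N - 1)).length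
      (fun q hq _ => Nat.le_length_digits_le 10 q (N - 1) hq)]
    -- G (N - 1) = G M
    congr 1
    rcases Nat.even_or_odd N with he | ho
    · have : M = N - 1 := by
        have := Nat.even_iff.mp he
        omega
      rw [this]
    · have h1 : N % 2 = 1 := Nat.odd_iff.mp ho
      have hM2 : M = N - 2 := by omega
      have hstep : G (N - 1) = G (N - 1 - 1) :=
        G_step (N - 1) (by omega) (not_good_even (N - 1) (by omega) (by omega))
      rw [hstep, hM2]
      have h2 : N - 1 - 1 = N - 2 := by omega
      rw [h2]
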